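-- pv_equiv track=rewrite | github.com/dolittle007/Gene2TF | bin/gene2TF.py | gene_binding_count4hypergeometric
-- ===== SOURCE A (Python) =====
-- from collections import defaultdict, Counter
--
-- def gene_binding_count4hypergeometric(in_genes, gene_tf_map):
--     '''
--     Output:
--     a dict of the number genes for binding TFs
--     { 'TF1' : 10, 'TF2': 20 }
--     '''
--     c = Counter()
--     input_genes = set(in_genes)
--     for i in input_genes:
--         if i in gene_tf_map:
--             tfs = set(gene_tf_map[i].replace(',', ':').split(':'))
--             c.update(tfs)
--     return c
-- ===== SOURCE B (Python) =====
-- from collections import defaultdict, Counter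
--
-- def gene_binding_count4hypergeometric(in_genes, gene_tf_map):
--     index = defaultdict(set)
--     for gene in set(in_genes):
--         if gene in gene_tf_map:
--             for tf in gene_tf_map[gene].replace(',', ':').split(':'):
--                 index[tf].add(gene)
--     return Counter({tf: len(genes) for tf, genes in index.items()})
-- ===== Notes on version B (the rewrite author's own statement) =====
-- stated objective: alternative
-- what changed: B replaces A's running Counter (increment a count per distinct TF per gene) with a set-valued inverse index mapping each TF to the set of genes that bind it, built without A's per-gene TF dedup, and derives the counts as set sizes in a second pass.
import Mathlib
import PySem

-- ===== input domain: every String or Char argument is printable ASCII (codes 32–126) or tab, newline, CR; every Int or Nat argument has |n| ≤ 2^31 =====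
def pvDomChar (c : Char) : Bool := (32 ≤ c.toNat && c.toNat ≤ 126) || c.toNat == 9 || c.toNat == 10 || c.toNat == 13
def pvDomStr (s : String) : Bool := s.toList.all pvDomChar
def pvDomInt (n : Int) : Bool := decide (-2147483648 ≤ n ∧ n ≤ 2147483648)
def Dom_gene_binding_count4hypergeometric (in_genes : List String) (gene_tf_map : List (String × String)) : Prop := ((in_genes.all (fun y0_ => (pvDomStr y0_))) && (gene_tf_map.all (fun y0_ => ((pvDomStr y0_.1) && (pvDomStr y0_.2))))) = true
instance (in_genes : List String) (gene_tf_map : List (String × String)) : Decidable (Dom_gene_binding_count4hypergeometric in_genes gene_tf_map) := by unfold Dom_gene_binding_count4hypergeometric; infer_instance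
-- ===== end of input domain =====

-- B replaces A's running Counter by a set-valued inverse index (TF -> set of binding genes, built
-- without A's per-gene TF dedup) and derives the counts in a second pass; objective: alternative.

-- ===== PORT A =====
-- the token expression both programs share: gene_tf_map[i].replace(',', ':').split(':')
-- (':' is a nonempty literal separator, so split? is always `some`; getD [] is never taken)
def pvTokens (v : String) : List String :=
  (PySem.Str.split? (PySem.Str.replace v "," ":") ":").getD []

def gene_binding_count4hypergeometric (in_genes : List String) (gene_tf_map : List (String × String)) : List (String × Int) :=
  let m : PySem.Dict String String := PySem.Dict.mk gene_tf_map
  let input_genes : PySem.Set String := PySem.Set.ofList in_genes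
  let c : PySem.Dict String Int :=
    input_genes.foldl (fun c i =>
      match m.get? i with
      | some v => (PySem.Set.ofList (pvTokens v)).foldl (fun c t => c.modify t 0 (· + 1)) c
      | none => c) PySem.Dict.empty
  c.items

-- ===== PORT B =====
def gene_binding_count4hypergeometric_alt (in_genes : List String) (gene_tf_map : List (String × String)) : List (String × Int) :=
  let m : PySem.Dict String String := PySem.Dict.mk gene_tf_map
  let index : PySem.Dict String (PySem.Set String) :=
    (PySem.Set.ofList in_genes).foldl (fun d g =>
      match m.get? g with
      | some v => (pvTokens v).foldl (fun d t => d.modify t PySem.Set.empty (fun s => PySem.Set.add s g)) d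
      | none => d) PySem.Dict.empty
  index.items.map (fun p => (p.1, (p.2.length : Int)))

-- ===== PRECONDITION & SPEC =====
def Spec_gene_binding_count4hypergeometric (in_genes : List String) (gene_tf_map : List (String × String)) (out : List (String × Int)) : Prop := out = gene_binding_count4hypergeometric_alt in_genes gene_tf_map
instance (in_genes : List String) (gene_tf_map : List (String × String)) (out : List (String × Int)) : Decidable (Spec_gene_binding_count4hypergeometric in_genes gene_tf_map out) := by unfold Spec_gene_binding_count4hypergeometric; infer_instance

-- ===== CLAIM (what is proved, stated in full; the proofs are below) =====
def Claim_equal_gene_binding_count4hypergeometric : Prop := ∀ (in_genes : List String) (gene_tf_map : List (String × String)), Dom_gene_binding_count4hypergeometric in_genes gene_tf_map → Spec_gene_binding_count4hypergeometric in_genes gene_tf_map (gene_binding_count4hypergeometric in_genes gene_tf_map)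

-- ===== LEMMAS AND PROOFS =====

-- Lookup after B's inner loop: the gene is added (once) to the set of every token of its TF string.
theorem pv_getD_inner (g : String) (ts : List String) :
    ∀ (d : PySem.Dict String (PySem.Set String)) (k : String),
    (ts.foldl (fun d t => d.modify t PySem.Set.empty (fun s => PySem.Set.add s g)) d).getD k PySem.Set.empty
      = if k ∈ ts then PySem.Set.add (d.getD k PySem.Set.empty) g else d.getD k PySem.Set.empty := by
  induction ts with
  | nil => intro d k; simp
  | cons u ts ih =>
    intro d k
    simp only [List.foldl_cons, ih, PySem.Dict.getD_modify, List.mem_cons]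
    by_cases hku : k = u
    · subst hku
      simp only [true_or, if_pos]
      by_cases hk : k ∈ ts
      · rw [if_pos hk]
        by_cases hg : g ∈ PySem.Dict.getD d k PySem.Set.empty
        · rw [PySem.Set.add_of_mem hg]; exact PySem.Set.add_of_mem hg
        · exact PySem.Set.add_of_mem ((PySem.Set.mem_add _ _ _).mpr (Or.inr rfl))
      · rw [if_neg hk]
    · by_cases hk : k ∈ ts <;> simp [hk, hku]

-- One gene's step preserves the simultaneous invariant: equal key lists, Nodup keys,
-- A's count = size of B's gene set, and B's sets only gain the current gene g.
theorem pv_step (g : String) (ts : List String)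
    (c : PySem.Dict String Int) (d : PySem.Dict String (PySem.Set String))
    (hk : c.keys = d.keys) (hn : c.keys.Nodup)
    (hv : ∀ k, c.getD k 0 = ((d.getD k PySem.Set.empty).length : Int))
    (hgs : ∀ k, g ∉ d.getD k PySem.Set.empty) :
    ((PySem.Set.ofList ts).foldl (fun c t => c.modify t 0 (· + 1)) c).keys
        = (ts.foldl (fun d t => d.modify t PySem.Set.empty (fun s => PySem.Set.add s g)) d).keys
    ∧ ((PySem.Set.ofList ts).foldl (fun c t => c.modify t 0 (· + 1)) c).keys.Nodup
    ∧ (∀ k, ((PySem.Set.ofList ts).foldl (fun c t => c.modify t 0 (· + 1)) c).getD k 0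
        = (((ts.foldl (fun d t => d.modify t PySem.Set.empty (fun s => PySem.Set.add s g)) d).getD k PySem.Set.empty).length : Int))
    ∧ (∀ k x, x ∈ (ts.foldl (fun d t => d.modify t PySem.Set.empty (fun s => PySem.Set.add s g)) d).getD k PySem.Set.empty
        → x = g ∨ x ∈ d.getD k PySem.Set.empty) := by
  refine ⟨?_, ?_, ?_, ?_⟩
  · rw [PySem.Dict.keys_foldl_modify (l := PySem.Set.ofList ts) (d0 := (0 : Int)) (f := fun _ _ => (· + 1)),
        PySem.Dict.keys_foldl_modify (l := ts) (d0 := PySem.Set.empty) (f := fun _ _ s => PySem.Set.add s g),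
        hk, PySem.Set.update_eq_append_filter, PySem.Set.update_eq_append_filter, PySem.Set.ofList_ofList]
  · exact PySem.Dict.nodup_keys_foldl_modify_key (PySem.Set.ofList ts) (fun x => x) 0 (fun _ _ => (· + 1)) c hn
  · intro k
    rw [PySem.Dict.getD_foldl_modify_add_one, pv_getD_inner, hv k]
    by_cases hkts : k ∈ ts
    · have hcount : (PySem.Set.ofList ts).count k = 1 :=
        List.count_eq_one_of_mem (PySem.Set.nodup_ofList ts) ((PySem.Set.mem_ofList ts k).mpr hkts)
      rw [if_pos hkts, PySem.Set.add_of_not_mem (hgs k), hcount]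
      simp
    · have : k ∉ PySem.Set.ofList ts := fun h => hkts ((PySem.Set.mem_ofList ts k).mp h)
      rw [if_neg hkts, List.count_eq_zero_of_not_mem this]
      simp
  · intro k x hx
    rw [pv_getD_inner] at hx
    by_cases hkts : k ∈ ts
    · rw [if_pos hkts] at hx
      rcases (PySem.Set.mem_add _ _ _).mp hx with hold | hxg
      · exact Or.inr hold
      · exact Or.inl hxg
    · rw [if_neg hkts]  at hx
      exact Or.inr hx

-- The invariant carried over the whole (duplicate-free) gene list.
theorem pv_outer (m : PySem.Dict String String) :
    ∀ (gs : List String), gs.Nodup →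
    ∀ (c : PySem.Dict String Int) (d : PySem.Dict String (PySem.Set String)),
    c.keys = d.keys → c.keys.Nodup →
    (∀ k, c.getD k 0 = ((d.getD k PySem.Set.empty).length : Int)) →
    (∀ k x, x ∈ d.getD k PySem.Set.empty → x ∉ gs) →
    ((gs.foldl (fun c i =>
        match m.get? i with
        | some v => (PySem.Set.ofList (pvTokens v)).foldl (fun c t => c.modify t 0 (· + 1)) c
        | none => c) c).keys
      = (gs.foldl (fun d g =>
        match m.get? g with
        | some v => (pvTokens v).foldl (fun d t => d.modify t PySem.Set.empty (fun s => PySem.Set.add s g)) d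
        | none => d) d).keys
    ∧ (gs.foldl (fun c i =>
        match m.get? i with
        | some v => (PySem.Set.ofList (pvTokens v)).foldl (fun c t => c.modify t 0 (· + 1)) c
        | none => c) c).keys.Nodup
    ∧ ∀ k, (gs.foldl (fun c i =>
        match m.get? i with
        | some v => (PySem.Set.ofList (pvTokens v)).foldl (fun c t => c.modify t 0 (· + 1)) c
        | none => c) c).getD k 0
        = (((gs.foldl (fun d g =>
        match m.get? g with
        | some v => (pvTokens v).foldl (fun d t => d.modify t PySem.Set.empty (fun s => PySem.Set.add s g)) d
        | none => d) d).getD k PySem.Set.empty).length : Int)) := by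
  intro gs
  induction gs with
  | nil => intro _ c d hk hn hv _; exact ⟨hk, hn, hv⟩
  | cons g gs ih =>
    intro hnd c d hk hn hv hs
    simp only [List.foldl_cons]
    rcases List.nodup_cons.mp hnd with ⟨hg, hnd'⟩
    cases hm : m.get? g with
    | none =>
      exact ih hnd' c d hk hn hv (fun k x hx hmem => hs k x hx (List.mem_cons_of_mem _ hmem))
    | some v =>
      obtain ⟨h1, h2, h3, h4⟩ := pv_step g (pvTokens v) c d hk hn hv
        (fun k hgin => hs k g hgin List.mem_cons_self)
      exact ih hnd' _ _ h1 h2 h3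
        (fun k x hx hmem => (h4 k x hx).elim
          (fun hxg => hg (hxg ▸ hmem))
          (fun hold => hs k x hold (List.mem_cons_of_mem _ hmem)))

-- ===== VERDICT (by name: the statement is the Claim_ definition above) =====
theorem gene_binding_count4hypergeometric_spec : Claim_equal_gene_binding_count4hypergeometric := by
  intro in_genes gene_tf_map _
  unfold Spec_gene_binding_count4hypergeometric
  unfold gene_binding_count4hypergeometric gene_binding_count4hypergeometric_alt
  dsimp only
  obtain ⟨hkeys, hnd, hval⟩ :=
    pv_outer (PySem.Dict.mk gene_tf_map) (PySem.Set.ofList in_genes)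
      (PySem.Set.nodup_ofList in_genes) PySem.Dict.empty PySem.Dict.empty
      (rfl) (by rw [PySem.Dict.keys_empty]; exact List.nodup_nil)
      (fun k => by rw [PySem.Dict.getD_empty, PySem.Dict.getD_empty]; rfl)
      (fun k x hx => by rw [PySem.Dict.getD_empty] at hx; exact absurd hx (List.not_mem_nil))
  rw [PySem.Dict.items_eq_map_keys _ hnd 0,
      PySem.Dict.items_eq_map_keys _ (hkeys ▸ hnd) PySem.Set.empty,
      List.map_map, hkeys]
  exact List.map_congr_left (fun k _ => by simp only [Function.comp_apply]; rw [← hval k])
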